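-- pv_equiv track=rewrite | github.com/hlastras/competitive_programming | adventofcode/2019/problem16.py | build_pat
-- ===== SOURCE A (Python) =====
-- bp = [0, 1, 0, -1]
--
-- def build_pat(i, l):
--   p = []
--   pos = 0
--   while len(p) < l:
--     for _ in range(i):
--       p.append(bp[pos])
--     pos += 1
--     pos %= 4
--   return p[1:]
-- ===== SOURCE B (Python) =====
-- bp = [0, 1, 0, -1]
--
-- def build_pat(i, l):
--   if l <= 0:
--     return []
--   period = [v for v in bp for _ in range(i)]   # one full cycle: each base value stretched to a block of i
--   n = i * ((l + i - 1) // i)                   # total built length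
--   reps = (n + len(period) - 1) // len(period)  # whole cycles needed to cover n
--   return (period * reps)[1:n]
-- ===== Notes on version B (the rewrite author's own statement) =====
-- stated objective: alternative
-- what changed: Instead of growing the list element-by-element in a while loop tracking a rotating position, B materialises one full 4i-long cycle of the pattern once, tiles it with list repetition to cover the needed length, and slices out [1:n].
import Mathlib
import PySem

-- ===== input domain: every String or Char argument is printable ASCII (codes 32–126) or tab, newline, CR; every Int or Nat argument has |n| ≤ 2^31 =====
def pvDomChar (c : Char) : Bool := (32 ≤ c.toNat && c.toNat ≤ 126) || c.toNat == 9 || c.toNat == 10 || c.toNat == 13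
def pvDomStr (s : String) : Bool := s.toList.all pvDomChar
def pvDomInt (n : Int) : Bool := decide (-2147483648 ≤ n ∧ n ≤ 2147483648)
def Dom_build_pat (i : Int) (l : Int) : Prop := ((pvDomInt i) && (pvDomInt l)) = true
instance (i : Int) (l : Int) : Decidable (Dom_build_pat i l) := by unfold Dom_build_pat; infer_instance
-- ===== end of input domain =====

-- B builds one full 4i-long cycle once, tiles it to cover the needed length and slices [1:n],
-- instead of A's grow-by-append while loop with a rotating position (objective: alternative).

-- module constant bp = [0, 1, 0, -1]
def bp : List Int := [0, 1, 0, -1]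

-- ===== PORT A =====
-- the while-loop; fuel l.toNat + 1 suffices: under Pre_ each iteration appends i ≥ 1 elements
def buildLoop (i l : Int) : Nat → List Int → Int → List Int
  | 0, p, _ => p
  | Nat.succ f, p, pos =>
    if (p.length : Int) < l then
      -- for _ in range(i): p.append(bp[pos])  (pos is always in [0,4), so bp[pos] never raises)
      buildLoop i l f (p ++ List.replicate i.toNat ((PySem.List.pyGet? bp pos).getD 0))
        (PySem.Int.mod (pos + 1) 4)
    else p

def build_pat (i : Int) (l : Int) : List Int :=
  PySem.List.slice (buildLoop i l (l.toNat + 1) [] 0) (some 1) none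

-- ===== PORT B =====
def build_pat_alt (i : Int) (l : Int) : List Int :=
  if l ≤ 0 then []
  else
    -- period = [v for v in bp for _ in range(i)]
    let period := bp.flatMap (fun v => List.replicate i.toNat v)
    -- n = i * ((l + i - 1) // i)
    let n := i * PySem.Int.floordiv (l + i - 1) i
    -- reps = (n + len(period) - 1) // len(period)
    let reps := PySem.Int.floordiv (n + (period.length : Int) - 1) (period.length : Int)
    -- (period * reps)[1:n]
    PySem.List.slice (List.flatten (List.replicate reps.toNat period)) (some 1) (some n)

-- ===== PRECONDITION & SPEC =====
-- Pre_ excludes only i ≤ 0 with l > 0, where A's while loop never terminates (Python diverges).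
def Pre_build_pat (i : Int) (l : Int) : Prop := 1 ≤ i ∨ l ≤ 0
instance (i : Int) (l : Int) : Decidable (Pre_build_pat i l) := by unfold Pre_build_pat; infer_instance

def pvWitness_build_pat : Int × Int := (3, 7)

def Spec_build_pat (i : Int) (l : Int) (out : List Int) : Prop := out = build_pat_alt i l
instance (i : Int) (l : Int) (out : List Int) : Decidable (Spec_build_pat i l out) := by unfold Spec_build_pat; infer_instance

-- ===== CLAIM (what is proved, stated in full; the proofs are below) =====
def Claim_equal_build_pat : Prop := ∀ (i : Int) (l : Int), Dom_build_pat i l → Pre_build_pat i l → Spec_build_pat i l (build_pat i l)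

-- ===== LEMMAS AND PROOFS =====

-- the pattern value at output index k when starting from position 0
def pf (i : Int) (k : Nat) : Int :=
  (PySem.List.pyGet? bp (PySem.Int.mod (PySem.Int.floordiv (k : Int) i) 4)).getD 0

-- the suffix of values A's loop still has to append, as a function of pos and the remaining count r
def genL (i : Int) : Nat → Int → Int → List Int
  | 0, _, _ => []
  | Nat.succ f, pos, r =>
    if 0 < r then
      List.replicate i.toNat ((PySem.List.pyGet? bp pos).getD 0) ++
        genL i f (PySem.Int.mod (pos + 1) 4) (r - i)
    else []

theorem loop_eq_gen (i l : Int) (hi : 0 ≤ i) :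
    ∀ (fuel : Nat) (p : List Int) (pos : Int),
      buildLoop i l fuel p pos = p ++ genL i fuel pos (l - p.length) := by
  intro fuel
  induction fuel with
  | zero => intro p pos; simp [buildLoop, genL]
  | succ f ih =>
    intro p pos
    by_cases h : (p.length : Int) < l
    · rw [buildLoop, if_pos h, ih, genL, if_pos (by omega)]
      simp [List.append_assoc, Int.toNat_of_nonneg hi]
      ring_nf
    · rw [buildLoop, if_neg h, genL, if_neg (by omega)]
      simp

theorem gen_eq_map (i : Int) (hi : 1 ≤ i) :
    ∀ (fuel : Nat) (r pos : Int), r ≤ fuel → 0 ≤ pos → pos < 4 →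
      genL i fuel pos r =
        (List.range (i * PySem.Int.floordiv (r + i - 1) i).toNat).map
          (fun (k : Nat) => (PySem.List.pyGet? bp
            (PySem.Int.mod (pos + PySem.Int.floordiv (k : Int) i) 4)).getD 0) := by
  have hempty : ∀ r : Int, r ≤ 0 → (i * PySem.Int.floordiv (r + i - 1) i).toNat = 0 := by
    intro r hr
    have hq : PySem.Int.floordiv (r + i - 1) i < 1 := by
      rw [PySem.Int.floordiv_lt_iff_lt_mul (by omega)]; omega
    have h2 : i * PySem.Int.floordiv (r + i - 1) i ≤ 0 :=
      mul_nonpos_of_nonneg_of_nonpos (by omega) (by omega)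
    omega
  intro fuel
  induction fuel with
  | zero =>
    intro r pos hr _ _
    rw [hempty r (by omega)]
    simp [genL]
  | succ f ih =>
    intro r pos hr hpos0 hpos4
    by_cases h : 0 < r
    · -- bracket for q
      have hq1 : 1 ≤ PySem.Int.floordiv (r + i - 1) i := by
        rw [PySem.Int.le_floordiv_iff_mul_le (by omega)]; omega
      set q := PySem.Int.floordiv (r + i - 1) i with hqdef
      have hbr : q * i ≤ r + i - 1 ∧ r + i - 1 < (q + 1) * i :=
        (PySem.Int.floordiv_eq_iff_of_pos (by omega)).mp hqdef.symm
      have hq' : PySem.Int.floordiv (r - i + i - 1) i = q - 1 := by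
        rw [PySem.Int.floordiv_eq_iff_of_pos (by omega)]
        refine ⟨by nlinarith [hbr.1], by nlinarith [hbr.2]⟩
      have hNat : (i * q).toNat = i.toNat + (i * (q - 1)).toNat := by
        have h1 : 0 ≤ i * (q - 1) := mul_nonneg (by omega) (by omega)
        have e : i * q = i + i * (q - 1) := by ring
        omega
      rw [genL, if_pos h, hNat, List.range_add, List.map_append, List.map_map]
      have hmod4 : (0:Int) < 4 := by norm_num
      refine congrArg₂ (· ++ ·) ?_ ?_
      · -- first block: replicate
        refine (List.eq_replicate_iff.mpr ⟨by simp, ?_⟩).symm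
        intro b hb
        simp only [List.mem_map, List.mem_range] at hb
        obtain ⟨k, hk, rfl⟩ := hb
        have hdiv0 : PySem.Int.floordiv (k : Int) i = 0 := by
          rw [PySem.Int.floordiv_eq_iff_of_pos (by omega)]
          have hk' : (k : Int) < i := by omega
          constructor
          · simp
          · simpa using hk'
        rw [hdiv0]
        have : PySem.Int.mod (pos + 0) 4 = pos := by
          rw [PySem.Int.mod_eq_emod_of_pos hmod4]
          omega
        rw [this]
      · -- tail: induction hypothesis
        rw [ih (r - i) (PySem.Int.mod (pos + 1) 4) (by omega)
            (by rw [PySem.Int.mod_eq_emod_of_pos hmod4]; omega)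
            (by rw [PySem.Int.mod_eq_emod_of_pos hmod4]; omega)]
        rw [show r - i + i - 1 = r - i + i - 1 from rfl, hq']
        apply List.map_congr_left
        intro k hk
        congr 1
        have hcast : ((i.toNat + k : Nat) : Int) = (k : Int) + 1 * i := by
          push_cast [Int.toNat_of_nonneg (by omega : (0:Int) ≤ i)]; ring
        rw [hcast]
        rw [PySem.Int.floordiv_eq_ediv_of_pos (by omega),
            PySem.Int.floordiv_eq_ediv_of_pos (by omega),
            Int.add_mul_ediv_right _ _ (by omega : i ≠ 0),
            PySem.Int.mod_eq_emod_of_pos hmod4, PySem.Int.mod_eq_emod_of_pos hmod4,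
            PySem.Int.mod_eq_emod_of_pos hmod4]
        generalize (k : Int) / i = t
        have hm : ((pos + 1) % 4 + t) % 4 = (pos + (t + 1)) % 4 := by omega
        rw [hm]
    · rw [genL, if_neg h, hempty r (by omega)]
      simp

-- B-side: the period is the first 4i values of pf
theorem pf_periodic (i : Int) (hi : 1 ≤ i) (k : Nat) :
    pf i (k + 4 * i.toNat) = pf i k := by
  unfold pf
  congr 2
  have hP : ((i.toNat : Int)) = i := Int.toNat_of_nonneg (by omega)
  have hcast : ((k + 4 * i.toNat : Nat) : Int) = (k : Int) + 4 * i := by push_cast [hP]; ring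
  rw [hcast, PySem.Int.floordiv_eq_ediv_of_pos (by omega),
      PySem.Int.floordiv_eq_ediv_of_pos (by omega),
      Int.add_mul_ediv_right _ _ (by omega : i ≠ 0),
      PySem.Int.mod_eq_emod_of_pos (by norm_num), PySem.Int.mod_eq_emod_of_pos (by norm_num)]
  generalize (k : Int) / i = t
  omega

theorem pf_chunk (i : Int) (hi : 1 ≤ i) (c : Nat) (hc : c < 4) :
    (List.range i.toNat).map (fun j => pf i (c * i.toNat + j)) =
      List.replicate i.toNat ((PySem.List.pyGet? bp (c : Int)).getD 0) := by
  refine List.eq_replicate_iff.mpr ⟨by simp, ?_⟩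
  intro b hb
  simp only [List.mem_map, List.mem_range] at hb
  obtain ⟨j, hj, rfl⟩ := hb
  unfold pf
  congr 2
  have hP : ((i.toNat : Int)) = i := Int.toNat_of_nonneg (by omega)
  have hcast : ((c * i.toNat + j : Nat) : Int) = (j : Int) + (c : Int) * i := by push_cast [hP]; ring
  rw [hcast, PySem.Int.floordiv_eq_ediv_of_pos (by omega),
      Int.add_mul_ediv_right _ _ (by omega : i ≠ 0)]
  have hj0 : (j : Int) / i = 0 := by
    apply Int.ediv_eq_zero_of_lt (by omega)
    have : (j : Int) < (i.toNat : Int) := by exact_mod_cast hj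
    omega
  rw [hj0, PySem.Int.mod_eq_emod_of_pos (by norm_num)]
  omega

theorem period_eq_map (i : Int) (hi : 1 ≤ i) :
    bp.flatMap (fun v => List.replicate i.toNat v) =
      (List.range (4 * i.toNat)).map (pf i) := by
  have h4 : 4 * i.toNat = i.toNat + i.toNat + i.toNat + i.toNat := by ring
  rw [h4, List.range_add, List.range_add, List.range_add]
  simp only [List.map_append, List.map_map]
  have e0 := pf_chunk i hi 0 (by norm_num)
  have e1 := pf_chunk i hi 1 (by norm_num)
  have e2 := pf_chunk i hi 2 (by norm_num)
  have e3 := pf_chunk i hi 3 (by norm_num)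
  simp only [Nat.zero_mul, Nat.one_mul, Nat.zero_add] at e0 e1 e2 e3
  rw [two_mul] at e2
  rw [show 3 * i.toNat = i.toNat + i.toNat + i.toNat by ring] at e3
  simp only [Function.comp_def]
  rw [e1, e2, e3]
  rw [show List.map (pf i) (List.range i.toNat) = List.replicate i.toNat ((PySem.List.pyGet? bp ((0:Nat) : Int)).getD 0) from e0]
  simp [bp, List.flatMap, PySem.List.pyGet?, PySem.List.pyIdx?]

-- tiling the period m times gives the first m*4i values of pf
theorem tile_eq_map (i : Int) (hi : 1 ≤ i) (m : Nat) :
    List.flatten (List.replicate m (bp.flatMap (fun v => List.replicate i.toNat v))) =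
      (List.range (m * (4 * i.toNat))).map (pf i) := by
  induction m with
  | zero => simp
  | succ m ih =>
    rw [List.replicate_succ, List.flatten_cons, ih, period_eq_map i hi]
    rw [show (m + 1) * (4 * i.toNat) = 4 * i.toNat + m * (4 * i.toNat) by ring,
        List.range_add, List.map_append, List.map_map]
    refine congrArg₂ (· ++ ·) rfl ?_
    apply List.map_congr_left
    intro k _
    simp only [Function.comp_apply]
    rw [show 4 * i.toNat + k = k + 4 * i.toNat by ring, pf_periodic i hi k]

-- ===== VERDICT (by name: the statement is the Claim_ definition above) =====
theorem build_pat_spec : Claim_equal_build_pat := by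
  intro i l _ hpre
  unfold Spec_build_pat build_pat build_pat_alt
  by_cases hl : l ≤ 0
  · have h0 : l.toNat = 0 := by omega
    rw [h0, if_pos hl, buildLoop, if_neg (by simp; omega)]
    simp [PySem.List.slice]
  · have hi : 1 ≤ i := by rcases hpre with h | h <;> omega
    have hl1 : 1 ≤ l := by omega
    rw [if_neg hl, loop_eq_gen i l (by omega)]
    simp only [List.length_nil, Int.natCast_zero, sub_zero, List.nil_append]
    rw [gen_eq_map i hi (l.toNat + 1) l 0 (by omega) le_rfl (by norm_num)]
    simp only [zero_add]
    rw [show (fun (k : Nat) => (PySem.List.pyGet? bp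
          (PySem.Int.mod (PySem.Int.floordiv (k : Int) i) 4)).getD 0) = pf i from rfl]
    set q := PySem.Int.floordiv (l + i - 1) i with hq
    have hq1 : 1 ≤ q := by rw [hq, PySem.Int.le_floordiv_iff_mul_le (by omega)]; omega
    have hn1 : 1 ≤ i * q := by nlinarith
    -- period length
    have hlen : ((bp.flatMap (fun v => List.replicate i.toNat v)).length : Int) = 4 * i := by
      simp [bp, List.flatMap]
      omega
    rw [hlen]
    set reps := PySem.Int.floordiv (i * q + 4 * i - 1) (4 * i) with hreps
    have hbr : reps * (4 * i) ≤ i * q + 4 * i - 1 ∧ i * q + 4 * i - 1 < (reps + 1) * (4 * i) :=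
      (PySem.Int.floordiv_eq_iff_of_pos (by omega)).mp hreps.symm
    have hcover : i * q ≤ reps * (4 * i) := by nlinarith [hbr.2]
    have hreps0 : 0 ≤ reps := by nlinarith [hbr.1]
    rw [tile_eq_map i hi reps.toNat,
        PySem.List.slice_toNat _ (by norm_num) (by omega)]
    have hM : (i * q).toNat ≤ reps.toNat * (4 * i.toNat) := by
      have : (reps.toNat : Int) * (4 * (i.toNat : Int)) = reps * (4 * i) := by
        rw [Int.toNat_of_nonneg hreps0, Int.toNat_of_nonneg (by omega : (0:Int) ≤ i)]
      have h2 : ((reps.toNat * (4 * i.toNat) : Nat) : Int) = reps * (4 * i) := by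
        push_cast at this ⊢; linarith
      omega
    rw [show (1 : Int).toNat = 1 from rfl]
    rw [← List.drop_take, ← List.map_take, List.take_range, Nat.min_eq_left hM]
    rw [PySem.List.slice_from _ (by norm_num)]
    rfl
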